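-- pv_equiv track=rewrite | github.com/Aasthaengg/IBMdataset | Python_codes/p02989/s867129517.py | actual
-- ===== SOURCE A (Python) =====
-- def actual(n, D):
--     D.sort()
--
--     idx = int(len(D) // 2)
--     abc_max = D[:idx][-1]
--     arc_min = D[idx:][0]
--
--     k = 0
--
--     for i in range(abc_max + 1, arc_min + 1):
--         k += 1
--
--     return k
-- ===== SOURCE B (Python) =====
-- def actual(n, D):
--     D.sort()
--     idx = len(D) // 2
--     return D[idx] - D[idx - 1]
-- ===== Notes on version B (the rewrite author's own statement) =====
-- stated objective: simpler
-- what changed: B replaces A's element-by-element counting loop over range(abc_max+1, arc_min+1) and the two slice-indexings by the closed form sorted(D)[idx] - sorted(D)[idx-1].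
import Mathlib
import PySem

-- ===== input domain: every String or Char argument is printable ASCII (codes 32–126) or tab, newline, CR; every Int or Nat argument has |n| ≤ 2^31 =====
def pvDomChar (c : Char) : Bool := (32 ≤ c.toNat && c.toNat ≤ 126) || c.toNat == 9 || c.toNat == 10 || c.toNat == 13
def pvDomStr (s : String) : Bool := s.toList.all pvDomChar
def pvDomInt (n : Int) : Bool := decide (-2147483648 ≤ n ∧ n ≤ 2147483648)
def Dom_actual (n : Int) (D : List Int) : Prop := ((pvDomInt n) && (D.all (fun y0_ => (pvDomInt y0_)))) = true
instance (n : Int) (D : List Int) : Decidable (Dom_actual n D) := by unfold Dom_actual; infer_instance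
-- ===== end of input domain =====

-- B replaces A's counting loop over range(abc_max+1, arc_min+1) and the two slice-indexings by the
-- closed form sorted(D)[idx] - sorted(D)[idx-1] (simpler); both Pythons sort D in place (the claim is about the return value).

-- ===== PORT A =====
def actual (n : Int) (D : List Int) : Int :=
  let Ds := PySem.List.sorted D (fun x => x) false
  let idx := PySem.Int.floordiv (Ds.length : Int) 2
  let abc_max := PySem.List.pyGetD (PySem.List.slice Ds none (some idx)) (-1) 0
  let arc_min := PySem.List.pyGetD (PySem.List.slice Ds (some idx) none) 0 0
  (PySem.List.pyRange (abc_max + 1) (arc_min + 1) 1).foldl (fun k _ => k + 1) 0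

-- ===== PORT B =====
def actual_alt (n : Int) (D : List Int) : Int :=
  let s := PySem.List.sorted D (fun x => x) false
  let idx := PySem.Int.floordiv (s.length : Int) 2
  PySem.List.pyGetD s idx 0 - PySem.List.pyGetD s (idx - 1) 0

-- ===== PRECONDITION & SPEC =====
-- A raises IndexError (D[:idx][-1] on an empty slice) when len(D) < 2.
def Pre_actual (n : Int) (D : List Int) : Prop := 2 ≤ D.length
instance (n : Int) (D : List Int) : Decidable (Pre_actual n D) := by unfold Pre_actual; infer_instance
def pvWitness_actual : Int × List Int := (3, [1, 5, 2, 7])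

def Spec_actual (n : Int) (D : List Int) (out : Int) : Prop := out = actual_alt n D
instance (n : Int) (D : List Int) (out : Int) : Decidable (Spec_actual n D out) := by unfold Spec_actual; infer_instance

-- ===== CLAIM (what is proved, stated in full; the proofs are below) =====
def Claim_equal_actual : Prop := ∀ (n : Int) (D : List Int), Dom_actual n D → Pre_actual n D → Spec_actual n D (actual n D)

-- ===== LEMMAS AND PROOFS =====
theorem foldl_count (l : List Int) (init : Int) :
    l.foldl (fun k _ => k + 1) init = init + l.length := by
  induction l generalizing init with
  | nil => simp
  | cons a t ih => simp [List.foldl, ih]; omega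

-- ===== VERDICT (by name: the statements are the Claim_ definitions above) =====
theorem actual_spec : Claim_equal_actual := by
  intro n D _ hpre
  unfold Pre_actual at hpre
  simp only [Spec_actual, actual, actual_alt]
  set s := PySem.List.sorted D (fun x => x) false with hs
  have hlen : s.length = D.length := PySem.List.length_sorted D _ _
  have hm : 2 ≤ s.length := by omega
  set k : Nat := s.length / 2 with hk
  have hk1 : 1 ≤ k := by omega
  have hkl : k < s.length := by omega
  have hfd : PySem.Int.floordiv (s.length : Int) 2 = (k : Int) := by
    exact_mod_cast PySem.Int.floordiv_natCast s.length 2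
  rw [hfd]
  -- A's two slice-indexings
  have hslice1 : PySem.List.slice s none (some (k : Int)) = s.take k :=
    PySem.List.slice_to_natCast s k
  have hslice2 : PySem.List.slice s (some (k : Int)) none = s.drop k :=
    PySem.List.slice_from_natCast s k
  have hlt : (s.take k).length = k := by simp; omega
  have habc : PySem.List.pyGetD (s.take k) (-1) 0 = s[k - 1]'(by omega) := by
    rw [PySem.List.pyGetD_neg_ofNat (s.take k) 1 0 (by omega) (by omega)]
    simp [hlt, List.getElem_take]
  have harc : PySem.List.pyGetD (s.drop k) 0 0 = s[k]'hkl := by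
    have : (s.drop k) = s[k]'hkl :: s.drop (k + 1) := by
      rw [List.drop_eq_getElem_cons hkl]
    rw [this, PySem.List.pyGetD_zero_cons]
  rw [hslice1, hslice2, habc, harc]
  -- B's two indexings
  have hb1 : PySem.List.pyGetD s (k : Int) 0 = s[k]'hkl := by
    rw [PySem.List.pyGetD_natCast]
    exact List.getD_eq_getElem s 0 hkl
  have hb2 : PySem.List.pyGetD s ((k : Int) - 1) 0 = s[k - 1]'(by omega) := by
    have : ((k : Int) - 1) = ((k - 1 : Nat) : Int) := by omega
    rw [this, PySem.List.pyGetD_natCast]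
    exact List.getD_eq_getElem s 0 (by omega)
  rw [hb1, hb2]
  -- the counting loop is the length of the range
  rw [foldl_count]
  have hmono : s[k - 1]'(by omega) ≤ s[k]'hkl := by
    have := PySem.List.sorted_id_getElem_mono (xs := D) (p := k - 1) (q := k)
      (by omega) (by rw [← hs] at *; omega)
    simpa [← hs] using this
  rw [PySem.List.length_pyRange_one]
  omega
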